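-- pv_equiv track=rewrite | github.com/kolzchut/Kolsherut-Application | ETL/data/plugins/srm-etl/operators/derive_es/to_dp.py | _safe_reorder_responses_by_category
-- ===== SOURCE A (Python) =====
-- def _safe_reorder_responses_by_category(responses, category):
--     """Move responses matching the category to the front."""
--     if not responses:
--         return []
--     matches = []
--     others = []
--     for r in responses:
--         parts = r.get('id', '').split(':')
--         if len(parts) > 1 and parts[1] == category:
--             matches.append(r)
--         else:
--             others.append(r)
--     return matches + others
-- ===== SOURCE B (Python) =====
-- def _safe_reorder_responses_by_category(responses, category):
--     """Move responses matching the category to the front (single stable sort)."""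
--     def misses(r):
--         parts = r.get('id', '').split(':')
--         return not (len(parts) > 1 and parts[1] == category)
--     return sorted(responses, key=misses)
-- ===== Notes on version B (the rewrite author's own statement) =====
-- stated objective: idiomatic
-- what changed: Replaces the two-accumulator partition loop with a single stable sort keyed on a boolean 'does not match the category' predicate; stability keeps each group's original order.
import Mathlib
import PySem

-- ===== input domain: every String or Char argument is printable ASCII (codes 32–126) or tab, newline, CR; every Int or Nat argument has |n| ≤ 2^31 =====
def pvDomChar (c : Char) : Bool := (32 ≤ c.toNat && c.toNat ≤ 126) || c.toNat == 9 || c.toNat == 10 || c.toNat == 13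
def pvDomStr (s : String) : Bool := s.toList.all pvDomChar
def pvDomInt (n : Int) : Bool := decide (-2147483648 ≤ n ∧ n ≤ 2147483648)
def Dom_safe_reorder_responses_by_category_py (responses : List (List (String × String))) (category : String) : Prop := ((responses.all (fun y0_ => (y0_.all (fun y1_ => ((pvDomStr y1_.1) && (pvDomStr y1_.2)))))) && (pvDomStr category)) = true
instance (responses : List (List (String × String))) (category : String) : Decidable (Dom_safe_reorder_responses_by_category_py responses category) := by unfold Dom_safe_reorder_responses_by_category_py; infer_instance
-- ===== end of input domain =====

-- B replaces A's two-accumulator partition loop with one stable sort keyed on a boolean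
-- "does not match the category" predicate (objective: idiomatic; not faster).

-- ===== PORT A =====
-- Port of A: empty guard, then a loop over responses appending each r to `matches` or
-- `others` (the foldl state is the pair of the two lists), finally matches ++ others.
-- r.get('id','') is the first-match lookup (List.lookup; keys of a Python dict are unique), default ''; .split(':') is Str.split? (some, since ':' ≠ ''), so .getD []
-- is exact here; parts[1] under len(parts) > 1 is pyGetD parts 1 "".
def safe_reorder_responses_by_category_py (responses : List (List (String × String))) (category : String) : List (List (String × String)) :=
  if responses = [] then []
  else
    let st := responses.foldl
      (fun (st : List (List (String × String)) × List (List (String × String))) r =>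
        let parts := (PySem.Str.split? (((r.lookup "id").getD "")) ":").getD []
        if 1 < parts.length && (PySem.List.pyGetD parts 1 "" == category)
        then (st.1 ++ [r], st.2)
        else (st.1, st.2 ++ [r]))
      ([], [])
    st.1 ++ st.2

-- ===== PORT B =====
-- B's sort key: True iff the response does NOT match the category (same test as A's branch).
def pvMisses (category : String) (r : List (String × String)) : Bool :=
  let parts := (PySem.Str.split? (((r.lookup "id").getD "")) ":").getD []
  !(1 < parts.length && (PySem.List.pyGetD parts 1 "" == category))

-- Port of B: sorted(responses, key=misses) — one stable sort on the Bool key.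
def safe_reorder_responses_by_category_py_alt (responses : List (List (String × String))) (category : String) : List (List (String × String)) :=
  PySem.List.sorted responses (pvMisses category) false

-- ===== PRECONDITION & SPEC =====
def Spec_safe_reorder_responses_by_category_py (responses : List (List (String × String))) (category : String) (out : List (List (String × String))) : Prop := out = safe_reorder_responses_by_category_py_alt responses category
instance (responses : List (List (String × String))) (category : String) (out : List (List (String × String))) : Decidable (Spec_safe_reorder_responses_by_category_py responses category out) := by unfold Spec_safe_reorder_responses_by_category_py; infer_instance

-- ===== CLAIM (what is proved, stated in full; the proofs are below) =====
def Claim_equal_safe_reorder_responses_by_category_py : Prop := ∀ (responses : List (List (String × String))) (category : String), Dom_safe_reorder_responses_by_category_py responses category → Spec_safe_reorder_responses_by_category_py responses category (safe_reorder_responses_by_category_py responses category)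

-- ===== LEMMAS AND PROOFS =====

-- A's loop, from any accumulator pair, is the two filters appended to it.
lemma pvFoldA {α : Type} (p : α → Bool) :
    ∀ (xs F T : List α),
      xs.foldl (fun st r => if p r then (st.1 ++ [r], st.2) else (st.1, st.2 ++ [r])) (F, T)
        = (F ++ xs.filter p, T ++ xs.filter (fun r => !p r)) := by
  intro xs
  induction xs with
  | nil => intro F T; simp
  | cons x xs ih =>
    intro F T
    by_cases hx : p x = true
    · simp [List.foldl_cons, hx, ih]
    · simp only [Bool.not_eq_true] at hx
      simp [List.foldl_cons, hx, ih]

-- insertBy walks past a prefix it does not insert before.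
lemma pvInsertBy_append_left {α : Type} (before : α → α → Bool) (x : α) :
    ∀ (F T : List α), (∀ y ∈ F, before x y = false) →
      PySem.List.insertBy before x (F ++ T) = F ++ PySem.List.insertBy before x T := by
  intro F
  induction F with
  | nil => intro T _; simp
  | cons y F ih =>
    intro T h
    have hy : before x y = false := h y (by simp)
    simp [PySem.List.insertBy, hy, ih T (fun z hz => h z (by simp [hz]))]

-- inserting a false-keyed element in front of an all-true-keyed list.
lemma pvInsertBy_all_true {α : Type} (key : α → Bool) (x : α) (hx : key x = false) :
    ∀ (T : List α), (∀ y ∈ T, key y = true) →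
      PySem.List.insertBy (fun a b => decide (key a < key b)) x T = x :: T := by
  intro T hT
  cases T with
  | nil => simp [PySem.List.insertBy]
  | cons t ts =>
    have ht : key t = true := hT t (by simp)
    simp [PySem.List.insertBy, hx, ht]

-- the insertion-sort fold with a Bool key, from a false-block/true-block accumulator.
lemma pvFoldIns {α : Type} (key : α → Bool) :
    ∀ (xs F T : List α), (∀ y ∈ F, key y = false) → (∀ y ∈ T, key y = true) →
      xs.foldl (fun acc x => PySem.List.insertBy (fun a b => decide (key a < key b)) x acc) (F ++ T)
        = (F ++ xs.filter (fun x => !key x)) ++ (T ++ xs.filter key) := by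
  intro xs
  induction xs with
  | nil => intro F T _ _; simp
  | cons x xs ih =>
    intro F T hF hT
    by_cases hx : key x = true
    · have hins : PySem.List.insertBy (fun a b => decide (key a < key b)) x (F ++ T)
          = (F ++ T) ++ [x] := by
        apply PySem.List.insertBy_of_forall_not_before
        intro y _
        simp [hx, Bool.lt_iff]
      have hT' : ∀ y ∈ T ++ [x], key y = true := by
        intro y hy
        rcases List.mem_append.mp hy with h | h
        · exact hT y h
        · simp_all
      rw [List.foldl_cons, hins, show (F ++ T) ++ [x] = F ++ (T ++ [x]) by simp,
        ih F (T ++ [x]) hF hT']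
      simp [hx]
    · simp only [Bool.not_eq_true] at hx
      have hins : PySem.List.insertBy (fun a b => decide (key a < key b)) x (F ++ T)
          = F ++ x :: T := by
        rw [pvInsertBy_append_left _ _ F T (fun y hy => by simp [hx, hF y hy]),
          pvInsertBy_all_true key x hx T hT]
      have hF' : ∀ y ∈ F ++ [x], key y = false := by
        intro y hy
        rcases List.mem_append.mp hy with h | h
        · exact hF y h
        · simp_all
      rw [List.foldl_cons, hins, show F ++ x :: T = (F ++ [x]) ++ T by simp,
        ih (F ++ [x]) T hF' hT]
      simp [hx]

-- B's stable sort on a Bool key IS the partition: false-keyed elements first, in order.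
lemma pvSortedBool {α : Type} (key : α → Bool) (xs : List α) :
    PySem.List.sorted xs key false = xs.filter (fun x => !key x) ++ xs.filter key := by
  rw [PySem.List.sorted_eq_foldl_insertBy]
  have := pvFoldIns key xs [] [] (by simp) (by simp)
  simpa using this

-- ===== VERDICT (by name: the statement is the Claim_ definition above) =====
theorem safe_reorder_responses_by_category_py_spec : Claim_equal_safe_reorder_responses_by_category_py := by
  intro responses category _
  unfold Spec_safe_reorder_responses_by_category_py
  unfold safe_reorder_responses_by_category_py safe_reorder_responses_by_category_py_alt
  by_cases hnil : responses = []
  · simp [hnil, pvSortedBool]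
  · simp only [hnil, if_false]
    rw [pvFoldA (fun r =>
        let parts := (PySem.Str.split? (((r.lookup "id").getD "")) ":").getD []
        1 < parts.length && (PySem.List.pyGetD parts 1 "" == category)) responses [] []]
    rw [pvSortedBool (pvMisses category) responses]
    congr 1
    exact List.filter_congr (fun r _ => by simp [pvMisses])
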